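-- pv_equiv track=rewrite | github.com/pypi-data/pypi-mirror-4 | packages/FunEncryptions/funencryptions-1.0.2.tar.gz/funencryptions/funencryptions/algorithms.py | backwards_interleave
-- ===== SOURCE A (Python) =====
-- def backwards_interleave(string, decode = False):
-- 	"""
-- 	Interleaves the string with a backwards copy of itself. Decoding is the same process as encoding.
-- 	"""
-- 	result = u""
-- 	length = len(string)
-- 	remainder = divmod(length, 2)[1]
-- 	forward = "".join([string[i] for i in range(0, length, 2)])
-- 	backward = "".join([string[::-1][i] for i in range(remainder, length, 2)])
-- 	if remainder:
-- 		backward += " "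
-- 	result = u"".join([forward[i] + backward[i] for i in range(len(forward))])
-- 	if remainder:
-- 		result = result[:-1]
-- 	return result
-- ===== SOURCE B (Python) =====
-- def backwards_interleave(string, decode=False):
--     """
--     Interleaves the string with a backwards copy of itself. Decoding is the
--     same process as encoding. Single pass: position j takes string[j] when j
--     is even, and string[n - n%2 - j] when j is odd.
--     """
--     n = len(string)
--     r = n % 2
--     return "".join(string[j] if j % 2 == 0 else string[n - r - j] for j in range(n))
-- ===== Notes on version B (the rewrite author's own statement) =====
-- stated objective: faster
-- what changed: A builds a forward string of even-index chars and a backward string by re-slicing string[::-1] inside the comprehension for every index, space-pads on odd length, zips the two and trims; B is a single O(n) pass mapping each output position j directly to string[j] for even j and string[n - n%2 - j] for odd j.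
import Mathlib
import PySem

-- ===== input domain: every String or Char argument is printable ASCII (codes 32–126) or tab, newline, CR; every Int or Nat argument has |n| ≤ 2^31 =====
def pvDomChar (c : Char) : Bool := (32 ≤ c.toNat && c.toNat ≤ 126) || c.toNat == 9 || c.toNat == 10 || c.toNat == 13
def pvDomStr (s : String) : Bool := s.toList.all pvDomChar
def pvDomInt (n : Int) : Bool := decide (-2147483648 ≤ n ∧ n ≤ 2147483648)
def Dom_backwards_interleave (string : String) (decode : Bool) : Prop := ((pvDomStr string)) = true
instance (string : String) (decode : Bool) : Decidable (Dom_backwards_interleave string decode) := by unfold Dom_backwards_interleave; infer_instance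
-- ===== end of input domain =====

-- B replaces A's forward/backward intermediate strings, space padding and final trim with a
-- single index-mapping pass (position j takes s[j] if j is even, else s[n - n%2 - j]); objective: faster
-- (A re-slices string[::-1] per index; a timing run measured B faster).

-- ===== PORT A =====
-- Notes on exactness: string[::-1] is PySem.List.slice?; divmod(length,2)[1] is PySem.Int.divmod?;
-- string indexing uses PySem.List.pyGetD with an arbitrary default — every index A forms is in range,
-- so the default is never read (Python would raise only on out-of-range, which never occurs here).
def backwards_interleave (string : String) (decode : Bool) : String :=
  let cs := string.toList
  let length : Int := cs.length
  let remainder : Int := ((PySem.Int.divmod? length 2).getD (0, 0)).2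
  let forward : List Char := (PySem.List.pyRange 0 length 2).map (fun i => PySem.List.pyGetD cs i ' ')
  let rev : List Char := (PySem.List.slice? cs none none (-1)).getD []
  let backward0 : List Char := (PySem.List.pyRange remainder length 2).map (fun i => PySem.List.pyGetD rev i ' ')
  let backward : List Char := if remainder ≠ 0 then backward0 ++ [' '] else backward0
  let result : List Char := ((PySem.List.pyRange 0 (forward.length : Int) 1).map
      (fun i => [PySem.List.pyGetD forward i ' ', PySem.List.pyGetD backward i ' '])).flatten
  let result2 : List Char := if remainder ≠ 0 then PySem.List.slice result none (some (-1)) else result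
  String.ofList result2

-- ===== PORT B =====
def backwards_interleave_alt (string : String) (decode : Bool) : String :=
  let cs := string.toList
  let n : Int := cs.length
  let r : Int := PySem.Int.mod n 2
  String.ofList ((PySem.List.pyRange 0 n 1).map (fun j =>
    if PySem.Int.mod j 2 = 0 then PySem.List.pyGetD cs j ' '
    else PySem.List.pyGetD cs (n - r - j) ' '))


-- ===== PRECONDITION & SPEC =====
def Spec_backwards_interleave (string : String) (decode : Bool) (out : String) : Prop := out = backwards_interleave_alt string decode
instance (string : String) (decode : Bool) (out : String) : Decidable (Spec_backwards_interleave string decode out) := by unfold Spec_backwards_interleave; infer_instance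

-- ===== CLAIM (what is proved, stated in full; the proofs are below) =====
def Claim_equal_backwards_interleave : Prop := ∀ (string : String) (decode : Bool), Dom_backwards_interleave string decode → Spec_backwards_interleave string decode (backwards_interleave string decode)

-- ===== LEMMAS AND PROOFS =====

theorem flatten_pairs {α : Type} (F G : Nat → α) (m : Nat) :
    ((List.range m).map (fun i => [F i, G i])).flatten
      = (List.range (2*m)).map (fun j => if j % 2 = 0 then F (j/2) else G (j/2)) := by
  induction m with
  | zero => simp
  | succ m ih =>
    rw [List.range_succ, List.map_append, List.flatten_append, ih]
    have h1 : 2*(m+1) = (2*m + 1) + 1 := by ring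
    rw [h1, List.range_succ, List.range_succ, List.map_append, List.map_append]
    have e1 : (2*m) % 2 = 0 := by omega
    have e2 : (2*m)/2 = m := by omega
    have e3 : (2*m+1) % 2 = 1 := by omega
    have e4 : (2*m+1)/2 = m := by omega
    simp [e1, e2, e3, e4]

theorem pyRange_step2_zero (N : Nat) :
    PySem.List.pyRange 0 (N:Int) 2 = (List.range ((N+1)/2)).map (fun k => ((2*k : Nat) : Int)) := by
  rw [PySem.List.pyRange_of_pos 0 (N:Int) (by norm_num)]
  have hc : (if (0:Int) < (N:Int) then (((N:Int) - 0 + 2 - 1)/2).toNat else 0) = (N+1)/2 := by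
    split_ifs with h <;> omega
  rw [hc]
  apply List.map_congr_left
  intro k _
  push_cast
  ring

theorem pyRange_step2_rem (N : Nat) :
    PySem.List.pyRange ((N % 2 : Nat) : Int) (N:Int) 2
      = (List.range (N/2)).map (fun k => ((N % 2 + 2*k : Nat) : Int)) := by
  rw [PySem.List.pyRange_of_pos _ _ (by norm_num)]
  have hc : (if ((N % 2 : Nat):Int) < (N:Int) then (((N:Int) - (N % 2 : Nat) + 2 - 1)/2).toNat else 0) = N/2 := by
    split_ifs with h <;> omega
  rw [hc]
  apply List.map_congr_left
  intro k _
  push_cast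
  ring

theorem slice_neg_one {α : Type} (xs : List α) :
    PySem.List.slice xs none (some (-1)) = xs.take (xs.length - 1) := by
  simp [PySem.List.slice, PySem.List.clampIdx]
  split_ifs with h
  · simp [h]
  · have hl : 1 ≤ xs.length := List.length_pos_iff.mpr h
    omega

theorem getD_reverse {α : Type} (xs : List α) (k : Nat) (d : α) (h : k < xs.length) :
    xs.reverse.getD k d = xs.getD (xs.length - 1 - k) d := by
  rw [List.getD_eq_getElem _ _ (by simpa using h), List.getElem_reverse,
      List.getD_eq_getElem _ _ (by omega)]

theorem getD_map_range' {b : Type} (f : Nat → b) (m i : Nat) (d : b) (h : i < m) :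
    ((List.range m).map f).getD i d = f i := PySem.List.getD_map_range f m i d h

theorem main_eq (s : String) (d : Bool) : backwards_interleave s d = backwards_interleave_alt s d := by
  unfold backwards_interleave backwards_interleave_alt
  dsimp only
  generalize s.toList = cs
  apply congrArg String.ofList
  have hrem : ((PySem.Int.divmod? ((cs.length : Int)) 2).getD (0, 0)).2
      = ((cs.length % 2 : Nat) : Int) := by
    simp [PySem.Int.divmod?, Int.fmod_eq_emod]
  have hmodN : PySem.Int.mod ((cs.length : Int)) 2 = ((cs.length % 2 : Nat) : Int) := by
    rw [PySem.Int.mod_eq_emod_of_pos (by norm_num)]; omega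
  rw [hrem, hmodN, PySem.List.slice?_none_none_neg_one, Option.getD_some,
      pyRange_step2_zero, pyRange_step2_rem]
  simp only [List.map_map, Function.comp_def, PySem.List.pyGetD_natCast]
  set N := cs.length with hN
  have hrevD : ∀ k, k < N → cs.reverse.getD k ' ' = cs.getD (N - 1 - k) ' ' :=
    fun k hk => getD_reverse cs k ' ' hk
  have hmodj : ∀ j : Nat, PySem.Int.mod ((j:Nat) : Int) 2 = ((j % 2 : Nat) : Int) := by
    intro j; rw [PySem.Int.mod_eq_emod_of_pos (by norm_num)]; omega
  have hlen : ((List.range ((N+1)/2)).map (fun k => cs.getD (2*k) ' ')).length = (N+1)/2 := by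
    simp
  rcases Nat.mod_two_eq_zero_or_one N with hpar | hpar
  · -- N even: remainder is 0, no padding, no trim
    have h0 : ¬ (((N % 2 : Nat) : Int) ≠ 0) := by rw [hpar]; simp
    simp only [if_neg h0]
    rw [hlen, PySem.List.pyRange_zero_nat ((N+1)/2), PySem.List.pyRange_zero_nat N]
    simp only [List.map_map, Function.comp_def, PySem.List.pyGetD_natCast]
    rw [flatten_pairs]
    have h2fl : 2 * ((N+1)/2) = N := by omega
    rw [h2fl]
    apply List.map_congr_left
    intro j hj
    have hjN : j < N := List.mem_range.mp hj
    rw [hmodj]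
    rcases Nat.mod_two_eq_zero_or_one j with hj2 | hj2
    · rw [if_pos hj2, if_pos (show ((j % 2 : Nat) : Int) = 0 by rw [hj2]; norm_num)]
      rw [getD_map_range' _ _ _ _ (by omega)]
      have h2j : 2 * (j / 2) = j := by omega
      rw [h2j]
    · rw [if_neg (by omega), if_neg (show ¬ ((j % 2 : Nat) : Int) = 0 by rw [hj2]; norm_num)]
      rw [getD_map_range' _ _ _ _ (by omega)]
      have hidx : N % 2 + 2 * (j / 2) = j - 1 := by omega
      rw [hidx, hrevD (j-1) (by omega)]
      have hc : ((N:Int) - ((N % 2 : Nat):Int) - ((j:Nat):Int)) = (((N - N % 2 - j : Nat)):Int) := by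
        omega
      rw [hc, PySem.List.pyGetD_natCast]
      have hix : N - 1 - (j - 1) = N - N % 2 - j := by omega
      rw [hix]
  · -- N odd: padding and trim
    have h1 : (((N % 2 : Nat) : Int) ≠ 0) := by rw [hpar]; simp
    simp only [if_pos h1]
    rw [hlen, PySem.List.pyRange_zero_nat ((N+1)/2), PySem.List.pyRange_zero_nat N]
    simp only [List.map_map, Function.comp_def, PySem.List.pyGetD_natCast]
    rw [flatten_pairs, slice_neg_one]
    simp only [List.length_map, List.length_range]
    rw [← List.map_take, List.take_range]
    have hmin : min (2*((N+1)/2) - 1) (2*((N+1)/2)) = N := by omega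
    rw [hmin]
    apply List.map_congr_left
    intro j hj
    have hjN : j < N := List.mem_range.mp hj
    rw [hmodj]
    rcases Nat.mod_two_eq_zero_or_one j with hj2 | hj2
    · rw [if_pos hj2, if_pos (show ((j % 2 : Nat) : Int) = 0 by rw [hj2]; norm_num)]
      rw [getD_map_range' _ _ _ _ (by omega)]
      have h2j : 2 * (j / 2) = j := by omega
      rw [h2j]
    · rw [if_neg (by omega), if_neg (show ¬ ((j % 2 : Nat) : Int) = 0 by rw [hj2]; norm_num)]
      rw [List.getD_append _ _ _ _ (by simp; omega), getD_map_range' _ _ _ _ (by omega)]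
      have hidx : N % 2 + 2 * (j / 2) = j := by omega
      rw [hidx, hrevD j hjN]
      have hc : ((N:Int) - ((N % 2 : Nat):Int) - ((j:Nat):Int)) = (((N - N % 2 - j : Nat)):Int) := by
        omega
      rw [hc, PySem.List.pyGetD_natCast]
      have hix : N - 1 - j = N - N % 2 - j := by omega
      rw [hix]

-- ===== VERDICT (by name: the statement is the Claim_ definition above) =====
theorem backwards_interleave_spec : Claim_equal_backwards_interleave := by
  intro s d _
  unfold Spec_backwards_interleave
  exact main_eq s d
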